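-- pv_equiv track=rewrite | github.com/saninduhansara/PriceScope.lk | Data Scraping/glomark_scraper.py | is_valid_product
-- ===== SOURCE A (Python) =====
-- def is_valid_product(product_name, search_term):
--     """
--     Standard filter to remove "Peanut Butter" from "Butter" searches.
--     """
--     name_lower = product_name.lower()
--     term_lower = search_term.lower()
--
--     if "butter" in term_lower:
--         banned = ["peanut", "cashew", "biscuit", "cookie", "body", "lotion", "lip", "soap", "cream"]
--         if any(x in name_lower for x in banned): return False
--
--     if "curd" in term_lower:
--         if "curry" in name_lower or "curl" in name_lower or "diaper" in name_lower or "soap" in name_lower: return False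
--
--     if "soft drink" in term_lower:
--         if "wash" in name_lower or "soap" in name_lower or "shampoo" in name_lower or "tissue" in name_lower: return False
--
--     fruit_terms = ["lime", "orange", "apple", "papaya", "lemon"]
--     if any(f in term_lower for f in fruit_terms):
--         if "wash" in name_lower or "soap" in name_lower or "shampoo" in name_lower or "gel" in name_lower: return False
--
--     return True
-- ===== SOURCE B (Python) =====
-- # Inverted index: for each product-name substring, the set of search-term
-- # keywords under which it disqualifies the product.  We scan the product name
-- # side first and look up which terms block it, instead of scanning term rules.
-- BLOCKERS = {
--     "peanut": ["butter"], "cashew": ["butter"], "biscuit": ["butter"],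
--     "cookie": ["butter"], "body": ["butter"], "lotion": ["butter"],
--     "lip": ["butter"], "cream": ["butter"],
--     "curry": ["curd"], "curl": ["curd"], "diaper": ["curd"],
--     "soap": ["butter", "curd", "soft drink", "lime", "orange", "apple", "papaya", "lemon"],
--     "wash": ["soft drink", "lime", "orange", "apple", "papaya", "lemon"],
--     "shampoo": ["soft drink", "lime", "orange", "apple", "papaya", "lemon"],
--     "tissue": ["soft drink"],
--     "gel": ["lime", "orange", "apple", "papaya", "lemon"],
-- }
--
--
-- def is_valid_product(product_name, search_term):
--     name_lower = product_name.lower()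
--     term_lower = search_term.lower()
--     for sub, triggers in BLOCKERS.items():
--         if sub in name_lower and any(t in term_lower for t in triggers):
--             return False
--     return True
-- ===== Notes on version B (the rewrite author's own statement) =====
-- stated objective: alternative
-- what changed: Inverted the rule direction: instead of A's per-search-term if-branches that scan banned product substrings, B keeps an inverted index keyed by product-name substring mapping to the term keywords that make it disqualifying, and loops over the product-name side looking up triggers.
import Mathlib
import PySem

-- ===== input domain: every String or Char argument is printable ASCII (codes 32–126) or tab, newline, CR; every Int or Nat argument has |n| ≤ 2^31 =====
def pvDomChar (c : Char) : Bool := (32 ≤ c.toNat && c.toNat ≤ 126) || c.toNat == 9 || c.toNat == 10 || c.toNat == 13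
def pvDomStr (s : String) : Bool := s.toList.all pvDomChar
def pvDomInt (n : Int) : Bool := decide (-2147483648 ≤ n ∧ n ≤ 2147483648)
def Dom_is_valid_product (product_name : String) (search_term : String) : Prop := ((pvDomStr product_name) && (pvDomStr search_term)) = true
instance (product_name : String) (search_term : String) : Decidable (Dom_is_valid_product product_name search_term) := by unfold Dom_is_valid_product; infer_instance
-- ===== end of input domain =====

-- B inverts the rule direction: an index keyed by product-name substring mapping to the
-- term keywords under which it disqualifies, scanned name-side-first (objective: alternative).
-- ===== PORT A =====
def is_valid_product (product_name : String) (search_term : String) : Bool :=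
  let name_lower := PySem.Str.lower product_name
  let term_lower := PySem.Str.lower search_term
  if PySem.Str.isIn "butter" term_lower &&
      (["peanut", "cashew", "biscuit", "cookie", "body", "lotion", "lip", "soap", "cream"].any
        (fun x => PySem.Str.isIn x name_lower)) then false
  else if PySem.Str.isIn "curd" term_lower &&
      (PySem.Str.isIn "curry" name_lower || PySem.Str.isIn "curl" name_lower ||
       PySem.Str.isIn "diaper" name_lower || PySem.Str.isIn "soap" name_lower) then false
  else if PySem.Str.isIn "soft drink" term_lower &&
      (PySem.Str.isIn "wash" name_lower || PySem.Str.isIn "soap" name_lower ||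
       PySem.Str.isIn "shampoo" name_lower || PySem.Str.isIn "tissue" name_lower) then false
  else if (["lime", "orange", "apple", "papaya", "lemon"].any
        (fun f => PySem.Str.isIn f term_lower)) &&
      (PySem.Str.isIn "wash" name_lower || PySem.Str.isIn "soap" name_lower ||
       PySem.Str.isIn "shampoo" name_lower || PySem.Str.isIn "gel" name_lower) then false
  else true

-- ===== PORT B =====
-- inverted index: product-name substring → term keywords that make it disqualifying
def pvBlockers : List (String × List String) :=
  [("peanut", ["butter"]), ("cashew", ["butter"]), ("biscuit", ["butter"]),
   ("cookie", ["butter"]), ("body", ["butter"]), ("lotion", ["butter"]),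
   ("lip", ["butter"]), ("cream", ["butter"]),
   ("curry", ["curd"]), ("curl", ["curd"]), ("diaper", ["curd"]),
   ("soap", ["butter", "curd", "soft drink", "lime", "orange", "apple", "papaya", "lemon"]),
   ("wash", ["soft drink", "lime", "orange", "apple", "papaya", "lemon"]),
   ("shampoo", ["soft drink", "lime", "orange", "apple", "papaya", "lemon"]),
   ("tissue", ["soft drink"]),
   ("gel", ["lime", "orange", "apple", "papaya", "lemon"])]

-- the for-loop with early `return False`
def pvScanBlockers : List (String × List String) → String → String → Bool
  | [], _, _ => true
  | (sub, triggers) :: rest, name_lower, term_lower =>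
      if PySem.Str.isIn sub name_lower && triggers.any (fun t => PySem.Str.isIn t term_lower)
      then false
      else pvScanBlockers rest name_lower term_lower

def is_valid_product_alt (product_name : String) (search_term : String) : Bool :=
  let name_lower := PySem.Str.lower product_name
  let term_lower := PySem.Str.lower search_term
  pvScanBlockers pvBlockers name_lower term_lower

-- ===== PRECONDITION & SPEC =====
def Spec_is_valid_product (product_name : String) (search_term : String) (out : Bool) : Prop := out = is_valid_product_alt product_name search_term
instance (product_name : String) (search_term : String) (out : Bool) : Decidable (Spec_is_valid_product product_name search_term out) := by unfold Spec_is_valid_product; infer_instance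

-- ===== CLAIM (what is proved, stated in full; the proofs are below) =====
def Claim_equal_is_valid_product : Prop := ∀ (product_name : String) (search_term : String), Dom_is_valid_product product_name search_term → Spec_is_valid_product product_name search_term (is_valid_product product_name search_term)

-- ===== LEMMAS AND PROOFS =====
set_option maxHeartbeats 1000000 in
theorem is_valid_product_spec : Claim_equal_is_valid_product := by
  intro product_name search_term _
  unfold Spec_is_valid_product is_valid_product is_valid_product_alt pvBlockers
  simp only [pvScanBlockers, List.any_cons, List.any_nil, Bool.or_false,
    Bool.if_false_left, Bool.and_or_distrib_left, Bool.and_or_distrib_right, Bool.decide_eq_true, Bool.not_or,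
    Bool.and_true]
  ac_rfl
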